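-- pv_equiv track=rewrite | github.com/dash-xa/InterviewQuestionSolutions | GenerateParens.py | solution
-- ===== SOURCE A (Python) =====
-- def getFirstOcc(S):
--   firstOcc = {}
--   for i, char in enumerate(S):
--     if char not in firstOcc:
--       firstOcc[char] = i
--   return firstOcc
--
-- def solution(S: str) -> str:
--   """
--   Idea:
--   1. Build a table mapping a character to its first occurrence in the string
--   2. Iterate from the last character in the string. For each character index j, get the index i of its first occurrence in the string
--     - s[i:j+1] is then the longest possible consistent fragment of s which ends with j
--     - compare the length of this to the max length seen so far.
--     - If it is greater than or equal to the longest consistend fragment seen up to this point, set it as the new return value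
--
--   The time complexity is O(N), since we scan through the array once to build the index table and again to get the longest consistent string
--   The space complexity is O(1), since out index table only has 26 keys (one for each letter)
--   """
--   firstOcc = getFirstOcc(S)
--   bestLength, bestPair = -1, (0, 0)
--   for j in range(len(S) - 1, -1, -1):
--     i = firstOcc[S[j]]
--     length = (j+1) - i
--     if length >= bestLength:
--       bestLength = length
--       bestPair = (i, j)
--   return S[bestPair[0]:bestPair[1]+1]
-- ===== SOURCE B (Python) =====
-- def solution(S: str) -> str:
--   # Pick, among the distinct characters of S, the one whose first..last
--   # occurrence window is longest (ties: smallest last index), using string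
--   # search (index/rindex) and min with a tuple key -- no index tables, no
--   # scan over positions.
--   if not S:
--     return ""
--   best = min(dict.fromkeys(S),
--              key=lambda c: (S.index(c) - S.rindex(c), S.rindex(c)))
--   return S[S.index(best):S.rindex(best)+1]
-- ===== Notes on version B (the rewrite author's own statement) =====
-- stated objective: simpler
-- what changed: B drops A's first-occurrence index table and backward scan over all positions: it iterates over the distinct characters only, locating each first..last window directly with str.index/str.rindex and selecting the best one with min over a (negated span, last index) tuple key.
import Mathlib
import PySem

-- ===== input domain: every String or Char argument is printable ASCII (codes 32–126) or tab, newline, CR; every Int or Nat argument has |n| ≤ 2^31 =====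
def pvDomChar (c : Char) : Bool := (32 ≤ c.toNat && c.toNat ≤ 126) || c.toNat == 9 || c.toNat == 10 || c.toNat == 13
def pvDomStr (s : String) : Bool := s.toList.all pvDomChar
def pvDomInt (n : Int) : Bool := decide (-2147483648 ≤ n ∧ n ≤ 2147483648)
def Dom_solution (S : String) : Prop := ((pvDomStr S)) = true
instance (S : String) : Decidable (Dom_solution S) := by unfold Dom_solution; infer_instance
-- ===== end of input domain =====

-- B drops A's first-occurrence table and backward scan over all positions: it iterates over
-- the distinct characters only, locating each first..last window with string search
-- (index/rindex) and choosing the best by a tuple-keyed min; objective: simpler.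

-- ===== PORT A =====
def getFirstOcc (cs : List Char) : PySem.Dict Char Int :=
  (PySem.List.enumerate cs).foldl
    (fun d p => if d.contains p.2 = false then d.insert p.2 p.1 else d)
    PySem.Dict.empty

def solution (S : String) : String :=
  let cs := S.toList
  let firstOcc := getFirstOcc cs
  let r := (PySem.List.pyRange (PySem.Str.len S - 1) (-1) (-1)).foldl
    (fun (st : Int × Int × Int) j =>
      let c := (PySem.Str.pyGet? S j).getD ' '   -- S[j]; j is always in range here, so exact
      let i := firstOcc.getD c 0                 -- firstOcc[S[j]]; the key is always present, so exact
      let length := j + 1 - i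
      if st.1 ≤ length then (length, i, j) else st)
    (-1, (0, 0))
  PySem.Str.slice S (some r.2.1) (some (r.2.2 + 1))

-- ===== PORT B =====
def solution_alt (S : String) : String :=
  if S = "" then "" else
    -- min(dict.fromkeys(S), key=lambda c: (S.index(c) - S.rindex(c), S.rindex(c)));
    -- S.index/S.rindex never raise here (every key occurs in S), so Chars.find/rfind are exact
    match PySem.List.min2? (PySem.List.dedup S.toList)
        (fun c => PySem.Chars.find S.toList [c] - PySem.Chars.rfind S.toList [c])
        (fun c => PySem.Chars.rfind S.toList [c]) with
    | some best => PySem.Str.slice S (some (PySem.Chars.find S.toList [best]))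
        (some (PySem.Chars.rfind S.toList [best] + 1))
    | none => ""   -- unreachable: dict.fromkeys of a nonempty string is nonempty

-- ===== PRECONDITION & SPEC =====
def Spec_solution (S : String) (out : String) : Prop := out = solution_alt S
instance (S : String) (out : String) : Decidable (Spec_solution S out) := by unfold Spec_solution; infer_instance

-- ===== CLAIM (what is proved, stated in full; the proofs are below) =====
def Claim_equal_solution : Prop := ∀ (S : String), Dom_solution S → Spec_solution S (solution S)

-- ===== LEMMAS AND PROOFS =====

-- proof-side name for A's dict-building loop body (definitionally the port's lambda)
def fdStep (d : PySem.Dict Char Int) (p : Int × Char) : PySem.Dict Char Int :=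
  if d.contains p.2 = false then d.insert p.2 p.1 else d

def F (cs : List Char) (c : Char) : Int := (getFirstOcc cs).getD c 0

def chAt (cs : List Char) (j : Int) : Char := (PySem.List.pyGet? cs j).getD ' '

def vA (cs : List Char) (j : Int) : Int := j + 1 - F cs (chAt cs j)
def prb (cs : List Char) (j : Int) : Int × Int := (F cs (chAt cs j), j)

-- first / last occurrence index of c in cs, as naturals (meaningful when c ∈ cs)
def fiN (cs : List Char) (c : Char) : Nat := (PySem.Chars.find cs [c]).toNat
def liN (cs : List Char) (c : Char) : Nat := (PySem.Chars.rfind cs [c]).toNat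

-- generic >=-argmax fold (A's loop shape)
def geFold {ι α : Type} (v : ι → Int) (pr : ι → α) (b : Int) (p : α) (L : List ι) : Int × α :=
  L.foldl (fun st j => if st.1 ≤ v j then (v j, pr j) else st) (b, p)

def maxv {ι : Type} (v : ι → Int) (b : Int) (L : List ι) : Int :=
  L.foldl (fun acc j => max acc (v j)) b

def pick {ι α : Type} (pr : ι → α) (p : α) (o : Option ι) : α :=
  match o with
  | some j => pr j
  | none => p

theorem maxv_init_le {ι : Type} (v : ι → Int) (b : Int) (L : List ι) : b ≤ maxv v b L :=
  (PySem.List.le_foldl_max_int L v b).1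

theorem maxv_elem_le {ι : Type} (v : ι → Int) (b : Int) (L : List ι) :
    ∀ j ∈ L, v j ≤ maxv v b L :=
  (PySem.List.le_foldl_max_int L v b).2

theorem maxv_cons {ι : Type} (v : ι → Int) (b : Int) (a : ι) (L : List ι) :
    maxv v b (a :: L) = maxv v (max b (v a)) L := rfl

theorem maxv_append_singleton {ι : Type} (v : ι → Int) (b : Int) (L : List ι) (a : ι) :
    maxv v b (L ++ [a]) = max (maxv v b L) (v a) := by
  simp [maxv, List.foldl_append]

theorem maxv_mem {ι : Type} (v : ι → Int) (L : List ι) :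
    ∀ b, maxv v b L = b ∨ ∃ j ∈ L, maxv v b L = v j := by
  induction L with
  | nil => intro b; left; rfl
  | cons a T IH =>
    intro b
    rcases IH (max b (v a)) with h | ⟨j, hj, hv⟩
    · rw [maxv_cons, h]
      rcases max_choice b (v a) with h' | h'
      · left; exact h'
      · right; exact ⟨a, List.mem_cons_self, h'⟩
    · right
      exact ⟨j, List.mem_cons_of_mem _ hj, by rw [maxv_cons, hv]⟩

theorem maxv_init_mono {ι : Type} (v : ι → Int) (L : List ι) :
    ∀ b b', b' ≤ b → maxv v b L = max b (maxv v b' L) := by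
  induction L with
  | nil => intro b b' h; simp [maxv]; omega
  | cons a T IH =>
    intro b b' h
    rw [maxv_cons, maxv_cons]
    rw [IH (max b (v a)) (max b' (v a)) (by omega)]
    have h1 : v a ≤ max b' (v a) := le_max_right _ _
    have h2 : max b' (v a) ≤ maxv v (max b' (v a)) T := maxv_init_le _ _ _
    omega

theorem maxv_map {ι κ : Type} (v : κ → Int) (f : ι → κ) (b : Int) (L : List ι) :
    maxv v b (L.map f) = maxv (fun j => v (f j)) b L := by
  simp [maxv, List.foldl_map]

theorem maxv_reverse {ι : Type} (v : ι → Int) (L : List ι) :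
    ∀ b, maxv v b L.reverse = maxv v b L := by
  induction L using List.reverseRecOn with
  | nil => intro b; rfl
  | append_singleton T a IH =>
    intro b
    rw [List.reverse_append]
    simp only [List.reverse_cons, List.reverse_nil, List.nil_append, List.singleton_append]
    rw [maxv_cons, IH, maxv_append_singleton]
    rw [maxv_init_mono v T (max b (v a)) b (le_max_left _ _)]
    have h2 : b ≤ maxv v b T := maxv_init_le _ _ _
    omega

theorem ge_char {ι α : Type} (v : ι → Int) (pr : ι → α) (L : List ι) (b : Int) (p : α) :
    geFold v pr b p L
      = (maxv v b L, pick pr p (L.reverse.find? (fun j => decide (maxv v b L ≤ v j)))) := by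
  induction L using List.reverseRecOn with
  | nil => rfl
  | append_singleton T a IH =>
    have hF : geFold v pr b p (T ++ [a])
        = (if (geFold v pr b p T).1 ≤ v a then (v a, pr a) else geFold v pr b p T) := by
      simp [geFold, List.foldl_append]
    rw [hF, IH, maxv_append_singleton]
    rw [List.reverse_append]
    simp only [List.reverse_cons, List.reverse_nil, List.nil_append, List.singleton_append]
    by_cases h : maxv v b T ≤ v a
    · have h1 : max (maxv v b T) (v a) = v a := max_eq_right h
      rw [h1]
      rw [List.find?_cons_of_pos (by simp)]
      simp [pick, h]
    · have h1 : max (maxv v b T) (v a) = maxv v b T := max_eq_left (by omega)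
      rw [h1]
      rw [List.find?_cons_of_neg (by simpa using h)]
      simp [h]

theorem desc_rev (n : Nat) :
    (PySem.List.pyRange ((n : Int) - 1) (-1) (-1)).reverse
      = (List.range n).map (fun k : Nat => (k : Int)) := by
  rw [PySem.List.pyRange_neg_one]
  have hn : (((n : Int) - 1) - (-1)).toNat = n := by omega
  rw [hn]
  apply List.ext_getElem (by simp)
  intro i h1 h2
  simp only [List.getElem_reverse, List.getElem_map, List.getElem_range,
    List.length_map, List.length_range]
  simp only [List.length_map, List.length_range] at h1 h2
  omega

-- A's dict after the build loop: first occurrence of each character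
theorem dict_get?_enum (c : Char) :
    ∀ (t : List Char) (s : Int) (d : PySem.Dict Char Int),
    ((PySem.List.enumerate t s).foldl fdStep d).get? c =
      match d.get? c with
      | some v => some v
      | none => (PySem.List.index? t c).map (fun k => s + (k : Int)) := by
  intro t
  induction t with
  | nil =>
    intro s d
    cases h : d.get? c <;> simp [PySem.List.enumerate, h, PySem.List.index?]
  | cons a t IH =>
    intro s d
    have hen : PySem.List.enumerate (a :: t) s = (s, a) :: PySem.List.enumerate t (s + 1) := rfl
    rw [hen, List.foldl_cons, IH]
    by_cases hac : a = c
    · subst hac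
      cases hd : d.get? a with
      | some v =>
        have hcont : ¬ d.contains a = false := by
          intro hf
          rw [(PySem.Dict.get?_eq_none_iff_contains d a).mpr hf] at hd
          cases hd
        have : fdStep d (s, a) = d := by simp [fdStep, hcont]
        rw [this, hd]
      | none =>
        have hcont : d.contains a = false := (PySem.Dict.get?_eq_none_iff_contains d a).mp hd
        have hstep : fdStep d (s, a) = d.insert a s := by simp [fdStep, hcont]
        rw [hstep, PySem.Dict.get?_insert_self, PySem.List.index?_cons_self]
        simp
    · have hget : (fdStep d (s, a)).get? c = d.get? c := by
        unfold fdStep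
        by_cases hca : d.contains a = false
        · rw [if_pos hca]
          exact PySem.Dict.get?_insert_of_ne d s (fun h => hac h.symm)
        · rw [if_neg hca]
      rw [hget, PySem.List.index?_cons_of_ne t hac]
      cases hd : d.get? c with
      | some v => rfl
      | none =>
        cases hidx : PySem.List.index? t c with
        | none => rfl
        | some k =>
          show Option.map _ ((some k).bind fun a => some ((a : Int))) =
            Option.map _ ((some (k + 1)).bind fun a => some ((a : Int)))
          rw [Option.bind_some, Option.bind_some]
          simp only [Option.map_some, Option.some.injEq]
          push_cast
          ring

theorem F_eq_index (cs : List Char) (c : Char) (hc : c ∈ cs) :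
    ∃ k : Nat, PySem.List.index? cs c = some k ∧ F cs c = (k : Int) := by
  obtain ⟨k, hk⟩ : ∃ k, PySem.List.index? cs c = some k := by
    have := (PySem.List.index?_isSome_iff cs c).mpr hc
    cases h : PySem.List.index? cs c with
    | none => rw [h] at this; cases this
    | some k => exact ⟨k, rfl⟩
  refine ⟨k, hk, ?_⟩
  have hemp : (PySem.Dict.empty : PySem.Dict Char Int).get? c = none :=
    (PySem.Dict.get?_eq_none_iff_contains _ c).mpr (PySem.Dict.contains_empty c)
  have hg : (getFirstOcc cs).get? c = some ((0 : Int) + (k : Int)) := by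
    have := dict_get?_enum c cs 0 PySem.Dict.empty
    rw [hemp, hk] at this
    exact this
  rw [F, PySem.Dict.getD_eq_get?_getD, hg]
  simp

-- single-character prefix
theorem singleton_prefix_iff (c : Char) (l : List Char) : [c] <+: l ↔ l.head? = some c := by
  cases l with
  | nil => simp
  | cons b t =>
    constructor
    · rintro ⟨r, hr⟩
      simp only [List.singleton_append] at hr
      cases hr; rfl
    · intro h
      simp only [List.head?_cons, Option.some.injEq] at h
      exact ⟨t, by rw [h]; rfl⟩

theorem fi_spec (cs : List Char) (c : Char) (hc : c ∈ cs) :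
    PySem.Chars.find cs [c] = (fiN cs c : Int) ∧
    ∃ h : fiN cs c < cs.length, cs[fiN cs c] = c ∧
      ∀ j (hj : j < fiN cs c), cs[j]'(by omega) ≠ c := by
  simp only [fiN]
  have h0 : 0 ≤ PySem.Chars.find cs [c] :=
    (PySem.Chars.find_nonneg_iff cs [c]).mpr ((List.singleton_infix_iff c cs).mpr hc)
  obtain ⟨hpre, hmin⟩ := PySem.Chars.find_spec h0
  rw [singleton_prefix_iff, List.head?_drop] at hpre
  have hlt : (PySem.Chars.find cs [c]).toNat < cs.length := by
    by_contra hge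
    rw [List.getElem?_eq_none (by omega)] at hpre
    cases hpre
  have hget : cs[(PySem.Chars.find cs [c]).toNat] = c := by
    rw [List.getElem?_eq_getElem hlt] at hpre
    simpa using hpre
  refine ⟨by omega, hlt, hget, ?_⟩
  intro j hj
  have := hmin j hj
  rw [singleton_prefix_iff, List.head?_drop] at this
  intro hjc
  exact this (by rw [List.getElem?_eq_getElem (by omega)]; simp [hjc])

theorem singleton_isPrefixOf_drop (cs : List Char) (c : Char) (j : Nat) :
    [c].isPrefixOf (cs.drop j) = true ↔ ∃ hj : j < cs.length, cs[j] = c := by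
  rw [List.isPrefixOf_iff_prefix, singleton_prefix_iff, List.head?_drop]
  constructor
  · intro h
    have hlt : j < cs.length := by
      by_contra hge
      rw [List.getElem?_eq_none (by omega)] at h
      cases h
    rw [List.getElem?_eq_getElem hlt] at h
    exact ⟨hlt, by simpa using h⟩
  · rintro ⟨hj, hc⟩
    rw [List.getElem?_eq_getElem hj, hc]

theorem rfind_go_spec (cs : List Char) (c : Char) :
    ∀ m : Nat,
    (PySem.Chars.rfind.go cs [c] m = -1 ∧
      ∀ j, j ≤ m → ∀ hj : j < cs.length, cs[j] ≠ c) ∨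
    (∃ k, k ≤ m ∧ ∃ hk : k < cs.length, cs[k] = c ∧
      PySem.Chars.rfind.go cs [c] m = (k : Int) ∧
      ∀ j, k < j → j ≤ m → ∀ hj : j < cs.length, cs[j] ≠ c) := by
  intro m
  induction m with
  | zero =>
    by_cases h : [c].isPrefixOf cs = true
    · right
      obtain ⟨h0, hc0⟩ := (singleton_isPrefixOf_drop cs c 0).mp (by simpa using h)
      exact ⟨0, le_refl 0, h0, hc0, by simp [PySem.Chars.rfind.go, h], by omega⟩
    · left
      refine ⟨by simp [PySem.Chars.rfind.go, h], ?_⟩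
      intro j hj hjl
      have hj0 : j = 0 := by omega
      subst hj0
      intro hc0
      exact h ((singleton_isPrefixOf_drop cs c 0).mpr ⟨hjl, hc0⟩)
  | succ m IH =>
    have hgo : PySem.Chars.rfind.go cs [c] (m + 1)
        = if [c].isPrefixOf (cs.drop (m + 1)) = true then ((m + 1 : Nat) : Int)
          else PySem.Chars.rfind.go cs [c] m := by
      simp [PySem.Chars.rfind.go]
    by_cases h : [c].isPrefixOf (cs.drop (m + 1)) = true
    · right
      obtain ⟨hlt, hcm⟩ := (singleton_isPrefixOf_drop cs c (m + 1)).mp h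
      exact ⟨m + 1, le_refl _, hlt, hcm, by rw [hgo, if_pos h], by omega⟩
    · have hnot : ∀ hj : m + 1 < cs.length, cs[m + 1] ≠ c := by
        intro hj hc'
        exact h ((singleton_isPrefixOf_drop cs c (m + 1)).mpr ⟨hj, hc'⟩)
      rcases IH with ⟨hv, hall⟩ | ⟨k, hk, hkl, hkc, hv, hmax⟩
      · left
        refine ⟨by rw [hgo, if_neg h]; exact hv, ?_⟩
        intro j hj hjl
        rcases Nat.lt_or_ge j (m + 1) with h' | h'
        · exact hall j (by omega) hjl
        · have : j = m + 1 := by omega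
          subst this
          exact hnot hjl
      · right
        refine ⟨k, by omega, hkl, hkc, by rw [hgo, if_neg h]; exact hv, ?_⟩
        intro j hkj hj hjl
        rcases Nat.lt_or_ge j (m + 1) with h' | h'
        · exact hmax j hkj (by omega) hjl
        · have : j = m + 1 := by omega
          subst this
          exact hnot hjl

theorem li_spec (cs : List Char) (c : Char) (hc : c ∈ cs) :
    PySem.Chars.rfind cs [c] = (liN cs c : Int) ∧
    ∃ h : liN cs c < cs.length, cs[liN cs c] = c ∧
      ∀ j, liN cs c < j → ∀ hj : j < cs.length, cs[j] ≠ c := by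
  simp only [liN]
  have hdef : PySem.Chars.rfind cs [c] = PySem.Chars.rfind.go cs [c] cs.length := rfl
  rcases rfind_go_spec cs c cs.length with ⟨hv, hall⟩ | ⟨k, hk, hkl, hkc, hv, hmax⟩
  · exfalso
    obtain ⟨i, hi, hic⟩ := List.getElem_of_mem hc
    exact hall i (by omega) hi hic
  · have hR : PySem.Chars.rfind cs [c] = (k : Int) := by rw [hdef, hv]
    simp only [hR, Int.toNat_natCast]
    exact ⟨trivial, hkl, hkc, fun j hj hjl => hmax j hj (by omega) hjl⟩

theorem F_eq_fi (cs : List Char) (c : Char) (hc : c ∈ cs) : F cs c = (fiN cs c : Int) := by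
  obtain ⟨k, hk, hF⟩ := F_eq_index cs c hc
  obtain ⟨hkl, hkc, hkmin⟩ := PySem.List.getElem_of_index?_eq_some hk
  obtain ⟨_, hfl, hfc, hfmin⟩ := fi_spec cs c hc
  have : k = fiN cs c := by
    by_contra hne
    rcases Nat.lt_or_ge k (fiN cs c) with h' | h'
    · exact hfmin k h' hkc
    · exact hkmin (fiN cs c) (by omega) hfc
  rw [hF, this]

-- min2? returns a strict lexicographic minimum
theorem min2?_strict_min {α : Type} (xs : List α) (k1 k2 : α → Int) (x : α) (hx : x ∈ xs)
    (h : ∀ y ∈ xs, y ≠ x → k1 x < k1 y ∨ (k1 x = k1 y ∧ k2 x < k2 y)) :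
    PySem.List.min2? xs k1 k2 = some x := by
  have aux : ∀ (l : List α), (∀ y ∈ l, y = x ∨ (k1 x < k1 y ∨ (k1 x = k1 y ∧ k2 x < k2 y))) →
      ∀ (m : α),
      (m = x → l.foldl (fun acc y => match acc with
        | none => some y
        | some m => if (decide (k1 y < k1 m) || !decide (k1 m < k1 y) && decide (k2 y < k2 m)) = true
            then some y else some m) (some m) = some x) ∧
      ((k1 x < k1 m ∨ (k1 x = k1 m ∧ k2 x < k2 m)) → x ∈ l →
        l.foldl (fun acc y => match acc with
        | none => some y
        | some m => if (decide (k1 y < k1 m) || !decide (k1 m < k1 y) && decide (k2 y < k2 m)) = true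
            then some y else some m) (some m) = some x) := by
    intro l
    induction l with
    | nil =>
      intro _ m
      exact ⟨fun hm => by simp [hm], fun _ hx' => absurd hx' (List.not_mem_nil)⟩
    | cons a l IH =>
      intro hl m
      have hla : a = x ∨ (k1 x < k1 a ∨ (k1 x = k1 a ∧ k2 x < k2 a)) := hl a List.mem_cons_self
      have hlt : ∀ y ∈ l, y = x ∨ (k1 x < k1 y ∨ (k1 x = k1 y ∧ k2 x < k2 y)) :=
        fun y hy => hl y (List.mem_cons_of_mem _ hy)
      constructor
      · intro hm
        subst hm
        rcases hla with rfl | hBa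
        · -- a = x : condition is false (irreflexivity), accumulator stays x
          simp only [List.foldl_cons]
          rw [if_neg (by simp)]
          exact (IH hlt _).1 rfl
        · -- B a : a does not beat x
          simp only [List.foldl_cons]
          rw [if_neg (by rcases hBa with h' | ⟨he, h'⟩ <;> simp <;> omega)]
          exact (IH hlt _).1 rfl
      · intro hBm hxl
        rcases hla with rfl | hBa
        · -- a = x beats m
          simp only [List.foldl_cons]
          rw [if_pos (by rcases hBm with h' | ⟨he, h'⟩ <;> simp <;> omega)]
          exact (IH hlt _).1 rfl
        · have hxl' : x ∈ l := by
            rcases List.mem_cons.mp hxl with rfl | h'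
            · exfalso; rcases hBa with h' | ⟨he, h'⟩ <;> omega
            · exact h'
          simp only [List.foldl_cons]
          by_cases hcond : (decide (k1 a < k1 m) || !decide (k1 m < k1 a) && decide (k2 a < k2 m)) = true
          · rw [if_pos hcond]
            exact (IH hlt _).2 hBa hxl'
          · rw [if_neg hcond]
            exact (IH hlt _).2 hBm hxl'
  cases xs with
  | nil => cases hx
  | cons a t =>
    have hstep : PySem.List.min2? (a :: t) k1 k2
        = t.foldl (fun acc y => match acc with
        | none => some y
        | some m => if (decide (k1 y < k1 m) || !decide (k1 m < k1 y) && decide (k2 y < k2 m)) = true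
            then some y else some m) (some a) := rfl
    rw [hstep]
    have ht : ∀ y ∈ t, y = x ∨ (k1 x < k1 y ∨ (k1 x = k1 y ∧ k2 x < k2 y)) := by
      intro y hy
      by_cases hyx : y = x
      · exact Or.inl hyx
      · exact Or.inr (h y (List.mem_cons_of_mem _ hy) hyx)
    by_cases hax : a = x
    · exact (aux t ht a).1 hax
    · have hBa := h a List.mem_cons_self hax
      have hxt : x ∈ t := by
        rcases List.mem_cons.mp hx with rfl | h' 
        · exact absurd rfl hax
        · exact h'
      exact (aux t ht a).2 hBa hxt

-- closed form for A (nonempty input)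
def aPair (S : String) : Int × Int :=
  (geFold (vA S.toList) (prb S.toList) (-1) ((0 : Int), (0 : Int))
    (PySem.List.pyRange ((S.toList.length : Int) - 1) (-1) (-1))).2

theorem solutionA_eq (S : String) :
    solution S = PySem.Str.slice S (some (aPair S).1) (some ((aPair S).2 + 1)) := by
  unfold solution aPair geFold vA prb F chAt
  rfl

theorem chAt_nat (cs : List Char) (k : Nat) (hk : k < cs.length) :
    chAt cs (k : Int) = cs[k] := by
  rw [chAt, PySem.List.pyGet?_natCast, List.getElem?_eq_getElem hk]
  rfl

theorem vA_nat (cs : List Char) (k : Nat) (hk : k < cs.length) :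
    vA cs (k : Int) = (k : Int) + 1 - (fiN cs cs[k] : Int) := by
  rw [vA, chAt_nat cs k hk, F_eq_fi cs cs[k] (List.getElem_mem hk)]

theorem fiN_getElem_zero (cs : List Char) (h0 : 0 < cs.length) : fiN cs cs[0] = 0 := by
  obtain ⟨_, hlt, hc, hmin⟩ := fi_spec cs cs[0] (List.getElem_mem h0)
  by_contra hne
  exact hmin 0 (by omega) rfl

theorem main_pair (S : String) (hne : S.toList ≠ []) :
    ∃ (k0 : Nat) (hk0 : k0 < S.toList.length),
      aPair S = ((fiN S.toList (S.toList[k0]) : Int), (k0 : Int)) ∧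
      PySem.List.min2? (PySem.List.dedup S.toList)
        (fun c => PySem.Chars.find S.toList [c] - PySem.Chars.rfind S.toList [c])
        (fun c => PySem.Chars.rfind S.toList [c]) = some (S.toList[k0]) ∧
      liN S.toList (S.toList[k0]) = k0 := by
  set cs := S.toList with hcs
  set n := cs.length with hn
  have hnpos : 0 < n := List.length_pos_iff.mpr hne
  set vK : Nat → Int := fun k => vA cs (k : Int) with hvK
  set M : Int := maxv vK (-1) (List.range n) with hM
  -- A's fold in closed form over ascending Nat indices
  have hdesc : (PySem.List.pyRange ((n : Int) - 1) (-1) (-1)).reverse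
      = (List.range n).map (fun k : Nat => (k : Int)) := desc_rev n
  have hmaxA : maxv (vA cs) (-1) (PySem.List.pyRange ((n : Int) - 1) (-1) (-1)) = M := by
    rw [← maxv_reverse, hdesc, maxv_map]
  have hApair : aPair S = pick (fun k : Nat => prb cs (k : Int)) ((0 : Int), (0 : Int))
      ((List.range n).find? (fun k => decide (M ≤ vK k))) := by
    rw [show aPair S = (geFold (vA cs) (prb cs) (-1) ((0 : Int), (0 : Int))
        (PySem.List.pyRange ((n : Int) - 1) (-1) (-1))).2 from rfl]
    rw [ge_char, hmaxA, hdesc, List.find?_map]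
    show pick (prb cs) ((0 : Int), (0 : Int))
        (((List.range n).find? (fun k : Nat => decide (M ≤ vK k))).map (fun k : Nat => (k : Int)))
      = _
    cases ((List.range n).find? (fun k : Nat => decide (M ≤ vK k))) <;> rfl
  -- the maximum is positive (vK 0 = 1), so the scan finds an index
  have hv0 : vK 0 = 1 := by
    have := vA_nat cs 0 hnpos
    rw [fiN_getElem_zero cs hnpos] at this
    simpa [hvK] using this
  have hM1 : 1 ≤ M := by
    have := maxv_elem_le vK (-1) (List.range n) 0 (List.mem_range.mpr hnpos)
    omega
  obtain ⟨k0, hfind⟩ : ∃ k0, (List.range n).find? (fun k => decide (M ≤ vK k)) = some k0 := by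
    rcases maxv_mem vK (List.range n) (-1) with h | ⟨j, hj, hMv⟩
    · rw [← hM] at h; omega
    · have : ((List.range n).find? (fun k => decide (M ≤ vK k))).isSome :=
        List.find?_isSome.mpr ⟨j, hj, by rw [← hM] at hMv; simp [← hMv]⟩
      cases h : (List.range n).find? (fun k => decide (M ≤ vK k)) with
      | none => rw [h] at this; cases this
      | some k0 => exact ⟨k0, rfl⟩
  obtain ⟨hp0, i, hi, hik, hmin⟩ := List.find?_eq_some_iff_getElem.mp hfind
  have hik2 : k0 = i := by
    rw [List.getElem_range] at hik
    exact hik.symm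
  subst hik2
  have hk0n : k0 < n := by simpa using hi
  have hk0min : ∀ j, j < k0 → ¬ (M ≤ vK j) := by
    intro j hj hMj
    have := hmin j hj
    rw [List.getElem_range] at this
    simp [hMj] at this
  have hMk0 : vK k0 = M := by
    have h1 : M ≤ vK k0 := by simpa using hp0
    have h2 : vK k0 ≤ M := maxv_elem_le vK (-1) (List.range n) k0 (List.mem_range.mpr hk0n)
    omega
  -- the found index is the last occurrence of its character
  set c0 : Char := cs[k0] with hc0
  have hc0mem : c0 ∈ cs := List.getElem_mem hk0n
  obtain ⟨hliEq, hlilt, hlic, hlimax⟩ := li_spec cs c0 hc0mem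
  have hk0le : k0 ≤ liN cs c0 := by
    by_contra h
    exact hlimax k0 (by omega) hk0n rfl
  have hvli : vK (liN cs c0) = (liN cs c0 : Int) + 1 - (fiN cs c0 : Int) := by
    have := vA_nat cs (liN cs c0) hlilt
    rw [show cs[liN cs c0] = c0 from hlic] at this
    simpa [hvK] using this
  have hvk0 : vK k0 = (k0 : Int) + 1 - (fiN cs c0 : Int) := vA_nat cs k0 hk0n
  have hli_eq_k0 : liN cs c0 = k0 := by
    have h1 : vK (liN cs c0) ≤ M :=
      maxv_elem_le vK (-1) (List.range n) _ (List.mem_range.mpr hlilt)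
    omega
  -- B's min2? picks the same character
  have hmin2 : PySem.List.min2? (PySem.List.dedup cs)
      (fun c => PySem.Chars.find cs [c] - PySem.Chars.rfind cs [c])
      (fun c => PySem.Chars.rfind cs [c]) = some c0 := by
    apply min2?_strict_min _ _ _ c0 ((PySem.List.mem_dedup cs c0).mpr hc0mem)
    intro y hy hyne
    have hymem : y ∈ cs := (PySem.List.mem_dedup cs y).mp hy
    obtain ⟨hfiEqY, hfiltY, hficY, _⟩ := fi_spec cs y hymem
    obtain ⟨hliEqY, hliltY, hlicY, hlimaxY⟩ := li_spec cs y hymem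
    obtain ⟨hfiEq0, hfilt0, hfic0, _⟩ := fi_spec cs c0 hc0mem
    have hvliY : vK (liN cs y) = (liN cs y : Int) + 1 - (fiN cs y : Int) := by
      have := vA_nat cs (liN cs y) hliltY
      rw [show cs[liN cs y] = y from hlicY] at this
      simpa [hvK] using this
    have hYle : vK (liN cs y) ≤ M :=
      maxv_elem_le vK (-1) (List.range n) _ (List.mem_range.mpr hliltY)
    rw [hfiEqY, hliEqY, hfiEq0, hliEq]
    -- key1 comparison: c0's span is maximal
    have hkey1 : (fiN cs c0 : Int) - (liN cs c0 : Int) ≤ (fiN cs y : Int) - (liN cs y : Int) := by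
      omega
    rcases lt_or_eq_of_le hkey1 with hlt | heq
    · exact Or.inl hlt
    · -- equal spans: y's last occurrence is a later maximal index
      refine Or.inr ⟨heq, ?_⟩
      have hYmax : vK (liN cs y) = M := by omega
      have hge : k0 ≤ liN cs y := by
        by_contra h
        exact hk0min (liN cs y) (by omega) (by omega)
      have hne' : liN cs y ≠ k0 := by
        intro h
        apply hyne
        rw [← hlicY]
        simp [h, ← hc0]
      have : (liN cs c0 : Int) < (liN cs y : Int) := by omega
      omega
  refine ⟨k0, hk0n, ?_, hmin2, hli_eq_k0⟩
  rw [hApair, hfind]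
  show prb cs (k0 : Int) = _
  rw [prb, chAt_nat cs k0 hk0n, F_eq_fi cs cs[k0] (List.getElem_mem hk0n)]

-- ===== VERDICT (by name: the statement is the Claim_ definition above) =====
theorem solution_spec : Claim_equal_solution := by
  unfold Claim_equal_solution
  intro S _
  unfold Spec_solution
  by_cases hS : S = ""
  · subst hS; decide
  · have hne : S.toList ≠ [] := by
      intro hnil
      apply hS
      have h2 := congrArg String.ofList hnil
      simpa using h2
    obtain ⟨k0, hk0, hA, hB, hli⟩ := main_pair S hne
    obtain ⟨hfiEq, _, _, _⟩ := fi_spec S.toList (S.toList[k0]) (List.getElem_mem hk0)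
    obtain ⟨hliEq, _, _, _⟩ := li_spec S.toList (S.toList[k0]) (List.getElem_mem hk0)
    rw [solutionA_eq S, hA]
    rw [solution_alt, if_neg hS, hB]
    simp only [hfiEq, hliEq, hli]
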